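-- pv_equiv track=rewrite | github.com/vincentkoc/dexscraper | dexscraper/enhanced_protocol.py | _deduplicate_clusters
-- ===== SOURCE A (Python) =====
-- from typing import Dict, List, Optional
--
-- def _deduplicate_clusters(clusters: List[tuple]) -> List[tuple]:
--     """Remove overlapping clusters, keeping the best ones."""
--     if not clusters:
--         return []
--
--     # Sort by data richness (total number of values)
--     def cluster_score(cluster):
--         _, data = cluster
--         return sum(len(values) for values in data.values())
--
--     clusters.sort(key=cluster_score, reverse=True)
--
--     unique = []
--     used_ranges = []
--
--     for offset, data in clusters:
--         # Check if this overlaps significantly with existing clusters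
--         overlaps = False
--         for used_start, used_end in used_ranges:
--             if not (offset + 128 <= used_start or offset >= used_end):
--                 overlaps = True
--                 break
--
--         if not overlaps:
--             unique.append((offset, data))
--             used_ranges.append((offset, offset + 128))
--
--     return unique[:20]  # Limit to top 20 clusters
-- ===== SOURCE B (Python) =====
-- def _bisect_left(a, x, lo, hi):
--     """Leftmost insertion point for x in sorted a[lo:hi] (hand-rolled binary search)."""
--     if lo >= hi:
--         return lo
--     mid = (lo + hi) // 2
--     if a[mid] < x:
--         return _bisect_left(a, x, mid + 1, hi)
--     return _bisect_left(a, x, lo, mid)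
--
--
-- def _deduplicate_clusters(clusters):
--     """Remove overlapping clusters, keeping the best ones.
--
--     Sorts by data richness (like A, in place), then greedily accepts a cluster
--     iff no already-accepted offset lies within the open window
--     (offset - 128, offset + 128); accepted offsets are kept in a sorted list so
--     only the two binary-search neighbours need checking, and the scan stops as
--     soon as 20 clusters are accepted.
--     """
--     if not clusters:
--         return []
--
--     clusters.sort(key=lambda c: sum(len(v) for v in c[1].values()), reverse=True)
--
--     unique = []
--     starts = []  # sorted offsets of accepted clusters
--     for offset, data in clusters:
--         if len(unique) == 20:
--             break
--         i = _bisect_left(starts, offset, 0, len(starts))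
--         if (i > 0 and offset < starts[i - 1] + 128) or \
--            (i < len(starts) and starts[i] < offset + 128):
--             continue
--         unique.append((offset, data))
--         starts.insert(i, offset)
--     return unique
-- ===== Notes on version B (the rewrite author's own statement) =====
-- stated objective: alternative
-- what changed: A rescans the whole used_ranges list for every cluster; B keeps accepted offsets in a sorted list, decides overlap by a binary search probing only the two neighbouring offsets (valid since all ranges have width 128), and stops scanning once 20 clusters are accepted; measured cost is the same since both are dominated by the initial sort.
import Mathlib
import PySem

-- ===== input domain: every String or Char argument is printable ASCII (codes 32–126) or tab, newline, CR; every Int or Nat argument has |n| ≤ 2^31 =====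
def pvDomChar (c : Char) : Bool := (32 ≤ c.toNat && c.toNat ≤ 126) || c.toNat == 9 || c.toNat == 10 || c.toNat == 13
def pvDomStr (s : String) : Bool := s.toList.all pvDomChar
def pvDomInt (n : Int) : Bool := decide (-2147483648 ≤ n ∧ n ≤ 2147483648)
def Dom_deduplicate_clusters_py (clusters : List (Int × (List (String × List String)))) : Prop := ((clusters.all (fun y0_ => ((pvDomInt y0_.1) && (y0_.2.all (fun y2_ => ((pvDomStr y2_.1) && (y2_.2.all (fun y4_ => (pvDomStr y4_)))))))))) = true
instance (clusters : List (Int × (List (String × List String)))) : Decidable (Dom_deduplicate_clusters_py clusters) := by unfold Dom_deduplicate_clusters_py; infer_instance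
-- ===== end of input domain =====

-- B replaces A's linear scan over all previously used ranges by a sorted list of
-- accepted offsets probed by binary search (only the two neighbours can overlap,
-- since every range has width 128) and stops as soon as 20 clusters are accepted;
-- objective: alternative.  Both A and B sort `clusters` in place (same side effect);
-- the equivalence proved here is about the return value.

-- ===== PORT A =====
-- cluster_score: sum(len(values) for values in data.values())
def pvClusterScore (cluster : Int × (List (String × List String))) : Int :=
  (((PySem.Dict.mk cluster.2).values).map (fun values => (values.length : Int))).sum

-- the inner `for used_start, used_end in used_ranges: … break` loop
def pvOverlapsA (offset : Int) (used_ranges : List (Int × Int)) : Bool :=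
  used_ranges.any (fun ur => !(decide (offset + 128 ≤ ur.1) || decide (offset ≥ ur.2)))

-- the main `for offset, data in clusters` loop, state (unique, used_ranges)
def pvLoopA (cs : List (Int × (List (String × List String))))
    (unique : List (Int × (List (String × List String)))) (used_ranges : List (Int × Int)) :
    List (Int × (List (String × List String))) × List (Int × Int) :=
  match cs with
  | [] => (unique, used_ranges)
  | (offset, data) :: rest =>
    if pvOverlapsA offset used_ranges then pvLoopA rest unique used_ranges
    else pvLoopA rest (unique ++ [(offset, data)]) (used_ranges ++ [(offset, offset + 128)])

def deduplicate_clusters_py (clusters : List (Int × (List (String × List String)))) : List (Int × (List (String × List String))) :=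
  if clusters = [] then []
  else
    -- clusters.sort(key=cluster_score, reverse=True)
    let sortedCs := PySem.List.sorted clusters pvClusterScore true
    -- unique[:20] with a nonnegative bound is exactly List.take 20
    (pvLoopA sortedCs [] []).1.take 20

-- ===== PORT B =====
def pvScoreB (c : Int × (List (String × List String))) : Int :=
  (((PySem.Dict.mk c.2).values).map (fun v => (v.length : Int))).sum

-- hand-rolled _bisect_left(a, x, lo, hi); a[mid] is in range at every call
-- (0 ≤ lo ≤ mid < hi ≤ len a), so the getD default is never used
def pvBisectLeft (a : List Int) (x : Int) (lo hi : Nat) : Nat :=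
  if lo ≥ hi then lo
  else
    let mid := (lo + hi) / 2
    if a.getD mid 0 < x then pvBisectLeft a x (mid + 1) hi
    else pvBisectLeft a x lo mid
termination_by hi - lo
decreasing_by all_goals omega

-- the main loop of B, state (unique, starts); breaks once 20 are accepted;
-- starts[i-1] / starts[i] are guarded by 0 < i / i < len, so getD is exact
def pvLoopB (cs : List (Int × (List (String × List String))))
    (unique : List (Int × (List (String × List String)))) (starts : List Int) :
    List (Int × (List (String × List String))) :=
  match cs with
  | [] => unique
  | (offset, data) :: rest =>
    if unique.length = 20 then unique
    else
      let i := pvBisectLeft starts offset 0 starts.length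
      if (decide (0 < i) && decide (offset < starts.getD (i - 1) 0 + 128)) ||
         (decide (i < starts.length) && decide (starts.getD i 0 < offset + 128)) then
        pvLoopB rest unique starts
      else
        pvLoopB rest (unique ++ [(offset, data)]) (PySem.List.insert starts (i : Int) offset)

def deduplicate_clusters_py_alt (clusters : List (Int × (List (String × List String)))) : List (Int × (List (String × List String))) :=
  if clusters = [] then []
  else pvLoopB (PySem.List.sorted clusters pvScoreB true) [] []

-- ===== PRECONDITION & SPEC =====
def Spec_deduplicate_clusters_py (clusters : List (Int × (List (String × List String)))) (out : List (Int × (List (String × List String)))) : Prop := out = deduplicate_clusters_py_alt clusters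
instance (clusters : List (Int × (List (String × List String)))) (out : List (Int × (List (String × List String)))) : Decidable (Spec_deduplicate_clusters_py clusters out) := by unfold Spec_deduplicate_clusters_py; infer_instance

-- ===== CLAIM (what is proved, stated in full; the proofs are below) =====
def Claim_equal_deduplicate_clusters_py : Prop := ∀ (clusters : List (Int × (List (String × List String)))), Dom_deduplicate_clusters_py clusters → Spec_deduplicate_clusters_py clusters (deduplicate_clusters_py clusters)

-- ===== LEMMAS AND PROOFS =====

-- A's unique list only grows
theorem pvLoopA_prefix (cs : List (Int × (List (String × List String))))
    (u : List (Int × (List (String × List String)))) (r : List (Int × Int)) :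
    ∃ t, (pvLoopA cs u r).1 = u ++ t := by
  induction cs generalizing u r with
  | nil => exact ⟨[], by simp [pvLoopA]⟩
  | cons c rest ih =>
    obtain ⟨offset, data⟩ := c
    by_cases h : pvOverlapsA offset r
    · simpa [pvLoopA, h] using ih u r
    · obtain ⟨t, ht⟩ := ih (u ++ [(offset, data)]) (r ++ [(offset, offset + 128)])
      exact ⟨(offset, data) :: t, by simp [pvLoopA, h, ht]⟩

-- binary-search invariant: the result splits the sorted list at x
theorem pvBisectLeft_spec (a : List Int) (x : Int) (lo hi : Nat)
    (hsorted : a.Pairwise (· ≤ ·))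
    (hle : lo ≤ hi) (hhi : hi ≤ a.length)
    (hbelow : ∀ j (_ : j < a.length), j < lo → a[j] < x)
    (habove : ∀ j (_ : j < a.length), hi ≤ j → x ≤ a[j]) :
    pvBisectLeft a x lo hi ≤ a.length ∧
    (∀ j (_ : j < a.length), j < pvBisectLeft a x lo hi → a[j] < x) ∧
    (∀ j (_ : j < a.length), pvBisectLeft a x lo hi ≤ j → x ≤ a[j]) := by
  have hmono : ∀ i j (_ : i < a.length) (_ : j < a.length), i ≤ j → a[i] ≤ a[j] := by
    intro i j hi hj hij
    rcases Nat.eq_or_lt_of_le hij with rfl | h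
    · exact le_refl _
    · exact (List.pairwise_iff_getElem.mp hsorted) i j hi hj h
  clear hsorted
  revert hle hhi hbelow habove
  induction lo, hi using pvBisectLeft.induct (a := a) (x := x) with
  | case1 lo hi h =>
    intro hle hhi hbelow habove
    rw [pvBisectLeft, if_pos h]
    exact ⟨le_trans (by omega) hhi, fun j hj hji => hbelow j hj (by omega),
      fun j hj hji => habove j hj (by omega)⟩
  | case2 lo hi h mid hlt ih =>
    intro hle hhi hbelow habove
    have hmid : mid = (lo + hi) / 2 := rfl
    rw [hmid] at hlt ih
    rw [pvBisectLeft, if_neg h]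
    simp only [if_pos hlt]
    have hmidlen : (lo + hi) / 2 < a.length := by omega
    refine ih (by omega) hhi ?_ habove
    intro j hj hji
    have : a[j] ≤ a[(lo + hi) / 2] := hmono j _ hj hmidlen (by omega)
    have h2 : a[(lo + hi) / 2] < x := by
      rwa [List.getD_eq_getElem a 0 hmidlen] at hlt
    omega
  | case3 lo hi h mid hge ih =>
    intro hle hhi hbelow habove
    have hmid : mid = (lo + hi) / 2 := rfl
    rw [hmid] at hge ih
    rw [pvBisectLeft, if_neg h]
    simp only [if_neg hge]
    have hmidlen : (lo + hi) / 2 < a.length := by omega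
    refine ih (by omega) (by omega) hbelow ?_
    intro j hj hji
    have : a[(lo + hi) / 2] ≤ a[j] := hmono _ j hmidlen hj (by omega)
    have h2 : x ≤ a[(lo + hi) / 2] := by
      rw [List.getD_eq_getElem a 0 hmidlen] at hge
      omega
    omega

-- the two-neighbour probe on a sorted list equals A's linear overlap scan
theorem pvCheck_eq_any (l : List Int) (o : Int) (hs : l.Pairwise (· ≤ ·)) :
    ((decide (0 < pvBisectLeft l o 0 l.length) &&
       decide (o < l.getD (pvBisectLeft l o 0 l.length - 1) 0 + 128)) ||
     (decide (pvBisectLeft l o 0 l.length < l.length) &&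
       decide (l.getD (pvBisectLeft l o 0 l.length) 0 < o + 128))) =
    l.any (fun s => !(decide (o + 128 ≤ s) || decide (o ≥ s + 128))) := by
  obtain ⟨hle, hlt, hge⟩ := pvBisectLeft_spec l o 0 l.length hs (by omega) (le_refl _)
    (by omega) (by intro j hj hji; omega)
  set i := pvBisectLeft l o 0 l.length with hi
  rw [Bool.eq_iff_iff]
  simp only [Bool.or_eq_true, Bool.and_eq_true, decide_eq_true_eq, List.any_eq_true,
    Bool.not_eq_eq_eq_not, Bool.not_true, Bool.or_eq_false_iff, decide_eq_false_iff_not,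
    not_le, ge_iff_le]
  constructor
  · rintro (⟨h0, hlt128⟩ | ⟨hilen, hlt128⟩)
    · have hj : i - 1 < l.length := by omega
      refine ⟨l[i-1], List.getElem_mem hj, ?_, ?_⟩
      · have := hlt (i-1) hj (by omega)
        rw [List.getD_eq_getElem l 0 hj] at hlt128
        omega
      · rw [List.getD_eq_getElem l 0 hj] at hlt128
        omega
    · refine ⟨l[i], List.getElem_mem hilen, ?_, ?_⟩
      · rw [List.getD_eq_getElem l 0 hilen] at hlt128; omega
      · have := hge i hilen (le_refl _)
        omega
  · rintro ⟨s, hmem, h1, h2⟩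
    obtain ⟨j, hj, rfl⟩ := List.mem_iff_getElem.mp hmem
    have hmono := List.pairwise_iff_getElem.mp hs
    by_cases hji : j < i
    · left
      have hi1 : i - 1 < l.length := by omega
      refine ⟨by omega, ?_⟩
      rw [List.getD_eq_getElem l 0 hi1]
      have : l[j] ≤ l[i-1] := by
        rcases Nat.eq_or_lt_of_le (show j ≤ i - 1 by omega) with heq | hlt2
        · subst heq; exact le_refl _
        · exact hmono j (i-1) hj hi1 hlt2
      omega
    · right
      have hilen : i < l.length := by omega
      refine ⟨hilen, ?_⟩
      rw [List.getD_eq_getElem l 0 hilen]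
      have : l[i] ≤ l[j] := by
        rcases Nat.eq_or_lt_of_le (show i ≤ j by omega) with heq | hlt2
        · subst heq; exact le_refl _
        · exact hmono i j hilen hj hlt2
      omega

-- main correspondence: B's loop computes take 20 of A's loop, given that
-- `starts` is a sorted permutation of the offsets behind A's used_ranges
theorem pvMain (cs : List (Int × (List (String × List String))))
    (u : List (Int × (List (String × List String)))) (ss starts : List Int)
    (hperm : starts.Perm ss) (hsort : starts.Pairwise (· ≤ ·)) (hlen : u.length ≤ 20) :
    (pvLoopA cs u (ss.map (fun s => (s, s + 128)))).1.take 20 = pvLoopB cs u starts := by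
  induction cs generalizing u ss starts with
  | nil =>
    simp [pvLoopA, pvLoopB, List.take_of_length_le hlen]
  | cons c rest ih =>
    obtain ⟨offset, data⟩ := c
    by_cases h20 : u.length = 20
    · rw [pvLoopB, if_pos h20]
      obtain ⟨t, ht⟩ := pvLoopA_prefix ((offset, data) :: rest) u (ss.map (fun s => (s, s + 128)))
      rw [ht, List.take_left' h20]
    · have hguard :
          ((decide (0 < pvBisectLeft starts offset 0 starts.length) &&
             decide (offset < starts.getD (pvBisectLeft starts offset 0 starts.length - 1) 0 + 128)) ||
           (decide (pvBisectLeft starts offset 0 starts.length < starts.length) &&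
             decide (starts.getD (pvBisectLeft starts offset 0 starts.length) 0 < offset + 128))) =
          pvOverlapsA offset (ss.map (fun s => (s, s + 128))) := by
        rw [pvCheck_eq_any starts offset hsort, hperm.any_eq]
        simp only [pvOverlapsA, List.any_map]
        rfl
      rw [pvLoopB, if_neg h20]
      by_cases hov : pvOverlapsA offset (ss.map (fun s => (s, s + 128)))
      · rw [pvLoopA, if_pos hov]
        simp only [hguard, hov, if_pos]
        exact ih u ss starts hperm hsort hlen
      · rw [pvLoopA, if_neg hov]
        simp only [hguard, hov, if_neg, Bool.false_eq_true, not_false_eq_true]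
        obtain ⟨hle, hlt, hge⟩ := pvBisectLeft_spec starts offset 0 starts.length hsort
          (by omega) (le_refl _) (by omega) (by intro j hj hji; omega)
        set i := pvBisectLeft starts offset 0 starts.length with hidef
        have hins : PySem.List.insert starts (i : Int) offset =
            starts.take i ++ offset :: starts.drop i :=
          PySem.List.insert_natCast starts i offset hle
        have hmapnew : (ss ++ [offset]).map (fun s => (s, s + 128)) =
            ss.map (fun s => (s, s + 128)) ++ [(offset, offset + 128)] := by simp
        have hpermnew : (starts.take i ++ offset :: starts.drop i).Perm (ss ++ [offset]) := by
          refine (List.perm_middle).trans ?_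
          rw [List.take_append_drop]
          exact (hperm.cons offset).trans (List.perm_append_singleton offset ss).symm
        have hsortnew : (starts.take i ++ offset :: starts.drop i).Pairwise (· ≤ ·) := by
          rw [List.pairwise_append]
          refine ⟨hsort.sublist (List.take_sublist _ _), ?_, ?_⟩
          · rw [List.pairwise_cons]
            refine ⟨?_, hsort.sublist (List.drop_sublist _ _)⟩
            intro y hy
            obtain ⟨k, hk, rfl⟩ := List.mem_iff_getElem.mp hy
            rw [List.getElem_drop]
            exact hge (i + k) (by simp at hk; omega) (by omega)
          · intro x hx y hy
            obtain ⟨k, hk, rfl⟩ := List.mem_iff_getElem.mp hx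
            have hk' : k < i := by simp at hk; omega
            rw [List.getElem_take]
            have hxlt : starts[k] < offset := hlt k (by omega) hk'
            rcases List.mem_cons.mp hy with rfl | hy'
            · omega
            · obtain ⟨m, hm, rfl⟩ := List.mem_iff_getElem.mp hy'
              rw [List.getElem_drop]
              have := hge (i + m) (by simp at hm; omega) (by omega)
              omega
        rw [hins, ← hmapnew] at *
        exact ih (u ++ [(offset, data)]) (ss ++ [offset]) _ hpermnew hsortnew (by simp; omega)

-- ===== VERDICT (by name: the statement is the Claim_ definition above) =====
theorem deduplicate_clusters_py_spec : Claim_equal_deduplicate_clusters_py := by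
  intro clusters _
  unfold Spec_deduplicate_clusters_py deduplicate_clusters_py deduplicate_clusters_py_alt
  by_cases h : clusters = []
  · simp [h]
  · have hkey : pvClusterScore = pvScoreB := rfl
    simp only [h, if_false, hkey]
    simpa using pvMain (PySem.List.sorted clusters pvScoreB true) [] [] []
      (List.Perm.refl _) List.Pairwise.nil (by simp)
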